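-- pv_equiv track=rewrite | github.com/epi2me-labs/pore-c-py | src/pore_c2/model.py | splits_to_intervals
-- ===== SOURCE A (Python) =====
-- from typing import Any, Dict, List, Mapping, Optional, Tuple
--
-- def splits_to_intervals(positions: List[int], length: int) -> List[Tuple[int, int]]:
--     if len(positions) == 0:
--         return [(0, length)]
--     prefix, suffix = [], []
--     if positions[0] != 0:
--         prefix = [0]
--     if positions[-1] != length:
--         suffix = [length]
--     breaks = prefix + positions + suffix
--     return [(start, end) for start, end in zip(breaks[:-1], breaks[1:])]
-- ===== SOURCE B (Python) =====
-- def splits_to_intervals(positions, length):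
--     # Right-to-left sweep: walk the positions backwards carrying the NEXT
--     # boundary, emit intervals reversed, flip once at the end.
--     if not positions:
--         return [(0, length)]
--     out = []
--     nxt = length
--     rp = positions[::-1]
--     if rp[0] == length:
--         rp = rp[1:]
--     for p in rp:
--         out.append((p, nxt))
--         nxt = p
--     if nxt != 0:
--         out.append((0, nxt))
--     return out[::-1]
-- ===== Notes on version B (the rewrite author's own statement) =====
-- stated objective: alternative
-- what changed: Replaced the pad-with-0/length breaks list and zip of two slices by a right-to-left sweep over the reversed positions carrying the next right endpoint, emitting intervals in reverse and flipping the result once at the end.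
import Mathlib
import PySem

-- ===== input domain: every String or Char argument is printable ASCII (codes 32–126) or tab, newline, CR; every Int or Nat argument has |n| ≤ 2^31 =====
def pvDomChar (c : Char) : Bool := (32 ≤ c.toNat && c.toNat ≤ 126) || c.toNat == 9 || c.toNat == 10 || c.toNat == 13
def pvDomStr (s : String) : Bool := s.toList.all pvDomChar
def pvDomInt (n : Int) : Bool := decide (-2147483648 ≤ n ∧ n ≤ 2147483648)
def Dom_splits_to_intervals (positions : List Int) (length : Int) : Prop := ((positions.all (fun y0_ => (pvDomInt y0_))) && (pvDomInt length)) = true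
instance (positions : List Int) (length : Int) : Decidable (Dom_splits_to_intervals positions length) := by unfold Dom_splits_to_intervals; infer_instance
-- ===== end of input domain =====

-- B replaces A's pad-with-0/length breaks list and zip of slices by a right-to-left sweep over the reversed positions, building the output reversed and flipping it once (objective: alternative).


-- ===== PORT A =====
-- literal transliteration of A: prefix/suffix lists, breaks = prefix ++ positions ++ suffix,
-- then the pairs zip(breaks[:-1], breaks[1:]).
def splits_to_intervals (positions : List Int) (length : Int) : List (Int × Int) :=
  if positions.length = 0 then [(0, length)]
  else
    let pre : List Int := if (PySem.List.pyGet? positions 0).getD 0 ≠ 0 then [0] else []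
    let suf : List Int := if (PySem.List.pyGet? positions (-1)).getD 0 ≠ length then [length] else []
    let breaks := pre ++ positions ++ suf
    List.zip (PySem.List.slice breaks none (some (-1))) (PySem.List.slice breaks (some 1) none)

-- ===== PORT B =====
-- the for-loop of Source B: carries nxt and the (reversed) output accumulator
def altLoop (nxt : Int) (out : List (Int × Int)) : List Int → Int × List (Int × Int)
  | [] => (nxt, out)
  | p :: rest => altLoop p (out ++ [(p, nxt)]) rest

def splits_to_intervals_alt (positions : List Int) (length : Int) : List (Int × Int) :=
  match positions with
  | [] => [(0, length)]
  | _ :: _ =>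
    let rp := positions.reverse
    let rp' := match rp with
      | q :: qs => if q = length then qs else q :: qs
      | [] => []
    let r := altLoop length [] rp'
    let out := if r.1 ≠ 0 then r.2 ++ [(0, r.1)] else r.2
    out.reverse

-- ===== PRECONDITION & SPEC =====
def Spec_splits_to_intervals (positions : List Int) (length : Int) (out : List (Int × Int)) : Prop := out = splits_to_intervals_alt positions length
instance (positions : List Int) (length : Int) (out : List (Int × Int)) : Decidable (Spec_splits_to_intervals positions length out) := by unfold Spec_splits_to_intervals; infer_instance

-- ===== CLAIM (what is proved, stated in full; the proofs are below) =====
def Claim_equal_splits_to_intervals : Prop := ∀ (positions : List Int) (length : Int), Dom_splits_to_intervals positions length → Spec_splits_to_intervals positions length (splits_to_intervals positions length)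

-- ===== LEMMAS AND PROOFS =====

-- the consecutive pairs of a list of breakpoints
def pairs : List Int → List (Int × Int)
  | a :: b :: t => (a, b) :: pairs (b :: t)
  | _ => []

theorem zip_pairs : ∀ bs : List Int, List.zip bs.dropLast bs.tail = pairs bs
  | [] => by simp [pairs]
  | [_] => by simp [pairs]
  | a :: b :: t => by
      have h := zip_pairs (b :: t)
      rw [List.tail_cons] at h
      rw [List.dropLast_cons₂, List.tail_cons, List.zip_cons_cons, h]
      rfl

theorem pairs_snoc2 (xs : List Int) : ∀ (a b : Int), pairs (xs ++ [a, b]) = pairs (xs ++ [a]) ++ [(a, b)] := by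
  induction xs with
  | nil => intro a b; simp [pairs]
  | cons x t ih =>
    intro a b
    cases t with
    | nil => simp [pairs]
    | cons y t' =>
      have h := ih a b
      simp only [List.cons_append] at h ⊢
      simp [pairs, h]

theorem altLoop_spec (qs : List Int) : ∀ (nxt : Int) (out : List (Int × Int)),
    altLoop nxt out qs = (qs.getLastD nxt, out ++ (pairs (qs.reverse ++ [nxt])).reverse) := by
  induction qs with
  | nil => intro nxt out; simp [altLoop, pairs]
  | cons p rest ih =>
    intro nxt out
    simp only [altLoop]
    rw [ih p]
    refine congrArg₂ Prod.mk ?_ ?_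
    · simp [List.getLast?_cons]
    · rw [show (p :: rest).reverse ++ [nxt] = rest.reverse ++ [p, nxt] by simp]
      rw [pairs_snoc2]
      simp

-- ===== VERDICT =====
theorem splits_to_intervals_spec : Claim_equal_splits_to_intervals := by
  intro positions length _
  unfold Spec_splits_to_intervals splits_to_intervals splits_to_intervals_alt
  cases positions with
  | nil => simp
  | cons p0 tl =>
    rcases h : (p0 :: tl).reverse with _ | ⟨q, qs⟩
    · exact absurd (congrArg List.length h) (by simp)
    have hps : p0 :: tl = qs.reverse ++ [q] := by
      have h2 := congrArg List.reverse h
      simpa using h2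
    have hlast : tl.getLast?.getD p0 = q := by
      have : (p0 :: tl).getLast? = some q := by rw [hps]; simp
      simpa [List.getLast?_cons] using this
    simp only [List.length_cons, Nat.succ_ne_zero, reduceIte,
      PySem.List.pyGet?_zero_cons, PySem.List.pyGet?_neg_one, List.getLast?_cons,
      Option.getD_some, hlast]
    -- A's zip-of-slices is the consecutive pairs of breaks
    have hzip : ∀ bs : List Int,
        List.zip (PySem.List.slice bs none (some (-1))) (PySem.List.slice bs (some 1) none) = pairs bs := by
      intro bs
      rw [PySem.List.slice_to_neg_one, PySem.List.slice_from_one, zip_pairs]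
    by_cases hq : q = length
    · -- no suffix; the loop runs over qs, whose reverse is (p0 :: tl).dropLast
      simp only [hq, ne_eq, not_true_eq_false, reduceIte, List.append_nil]
      rw [altLoop_spec, hzip]
      have hrev : qs.reverse ++ [length] = p0 :: tl := by rw [hps, hq]
      have hn : qs.getLastD length = p0 := by
        cases hqs : qs.reverse with
        | nil =>
          have h1 := hrev; rw [hqs] at h1; simp at h1
          have h2 : qs = [] := by simpa using congrArg List.reverse hqs
          subst h2; simp [h1.1.symm]
        | cons z zs =>
          have h1 := hrev; rw [hqs] at h1; simp at h1
          have h3 : qs.getLast? = some z := by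
            rw [← List.head?_reverse, hqs]; rfl
          simp [h3, h1.1]
      rw [hrev, hn]
      by_cases hp0 : p0 = 0
      · simp [hp0]
      · simp only [hp0, not_false_eq_true, reduceIte, List.nil_append]
        rw [show (pairs (p0 :: tl)).reverse ++ [((0:Int), p0)] = ((0, p0) :: pairs (p0 :: tl)).reverse by simp]
        rw [List.reverse_reverse]
        cases tl with
        | nil => simp [pairs]
        | cons b t => simp [pairs]
    · -- suffix [length]; the loop runs over q :: qs, whose reverse is p0 :: tl
      simp only [ne_eq, hq, not_false_eq_true, reduceIte]
      rw [altLoop_spec, hzip]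
      have hrev : (q :: qs).reverse ++ [length] = (p0 :: tl) ++ [length] := by
        simp [← hps]
      have hn : (q :: qs).getLastD length = p0 := by
        have h1 : (q :: qs).getLast? = some p0 := by
          rw [← h]; simp [List.getLast?_reverse]
        simp [h1]
      rw [hrev, hn]
      by_cases hp0 : p0 = 0
      · simp [hp0]
      · simp only [hp0, not_false_eq_true, reduceIte, List.nil_append]
        rw [show (pairs ((p0 :: tl) ++ [length])).reverse ++ [((0:Int), p0)] = ((0, p0) :: pairs ((p0 :: tl) ++ [length])).reverse by simp]
        rw [List.reverse_reverse]
        simp [pairs]
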